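-- pv_equiv track=rewrite | github.com/maheshbakali/idp-pipeline | src/azure_function/function_app.py | _blob_path_under_uploads_container
-- ===== SOURCE A (Python) =====
-- _UPLOADS_CONTAINER = "uploads"
--
-- def _blob_path_under_uploads_container(blob_name: str) -> tuple[str, str]:
--     """
--     Return (relative_path, full_path_for_logs) where relative_path is
--     docType/uploadId/fileName inside the uploads container.
--
--     The Functions runtime sometimes sets blob.name to either:
--     - invoice/<uploadId>/file.pdf (path under the container), or
--     - uploads/invoice/<uploadId>/file.pdf (container prefix duplicated with binding path).
--     """
--     raw = (blob_name or "").strip("/")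
--     rel = raw
--     prefix = f"{_UPLOADS_CONTAINER}/"
--     while rel.startswith(prefix):
--         rel = rel[len(prefix) :]
--     full = f"{_UPLOADS_CONTAINER}/{rel}" if rel else _UPLOADS_CONTAINER
--     return rel, full
-- ===== SOURCE B (Python) =====
-- _UPLOADS_CONTAINER = "uploads"
--
-- def _blob_path_under_uploads_container(blob_name: str) -> tuple[str, str]:
--     parts = (blob_name or "").strip("/").split("/")
--     i = 0
--     while i < len(parts) - 1 and parts[i] == _UPLOADS_CONTAINER:
--         i += 1
--     rel = "/".join(parts[i:])
--     full = f"{_UPLOADS_CONTAINER}/{rel}" if rel else _UPLOADS_CONTAINER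
--     return rel, full
-- ===== Notes on version B (the rewrite author's own statement) =====
-- stated objective: alternative
-- what changed: Replaces A's repeated string-prefix-stripping while loop over the raw string with a split into '/'-separated segments, an index that skips leading 'uploads' segments (never the last one), and a single join of the remaining suffix.
import Mathlib
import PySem

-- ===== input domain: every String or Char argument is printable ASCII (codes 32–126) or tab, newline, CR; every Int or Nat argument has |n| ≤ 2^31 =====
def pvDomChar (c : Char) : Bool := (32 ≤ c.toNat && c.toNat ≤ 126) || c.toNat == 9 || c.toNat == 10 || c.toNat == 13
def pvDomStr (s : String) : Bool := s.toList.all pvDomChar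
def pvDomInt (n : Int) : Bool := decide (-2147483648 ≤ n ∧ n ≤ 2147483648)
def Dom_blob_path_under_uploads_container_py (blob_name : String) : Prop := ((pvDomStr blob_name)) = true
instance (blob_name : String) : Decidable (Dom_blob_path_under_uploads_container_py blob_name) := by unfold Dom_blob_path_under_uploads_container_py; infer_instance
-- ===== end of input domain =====

-- B replaces A's repeated "uploads/"-prefix-stripping while loop by split-into-segments,
-- skip leading "uploads" segments (never the last), and one join (objective: alternative).

-- ===== PORT A =====
-- rel[len(prefix):] with len(prefix) = 8; cited by the port's termination proof
theorem pvSlice8 (rel : List Char) : PySem.Chars.slice rel (some 8) none = rel.drop 8 := by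
  rw [PySem.Chars.slice_eq_listSlice, PySem.List.slice_from rel (a := 8) (by norm_num)]
  rfl

-- the while loop: while rel.startswith("uploads/"): rel = rel[len(prefix):]
def pvStripLoopA (rel : List Char) : List Char :=
  if PySem.Chars.startswith rel "uploads/".toList then
    pvStripLoopA (PySem.Chars.slice rel (some 8) none)
  else rel
termination_by rel.length
decreasing_by
  rename_i h
  have hp : "uploads/".toList <+: rel := by
    simpa [PySem.Chars.startswith, List.isPrefixOf_iff_prefix] using h
  have hlen : 8 ≤ rel.length := by
    have := hp.length_le; simpa using this
  rw [pvSlice8]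
  simp
  omega

def blob_path_under_uploads_container_py (blob_name : String) : String × String :=
  -- raw = (blob_name or "").strip("/")
  let raw := PySem.Chars.stripChars
      (if blob_name.toList.isEmpty then "".toList else blob_name.toList) "/".toList
  let rel := pvStripLoopA raw
  -- full = f"uploads/{rel}" if rel else "uploads"
  let full := if rel.isEmpty then "uploads".toList else "uploads/".toList ++ rel
  (String.ofList rel, String.ofList full)

-- ===== PORT B =====
-- the index loop: while i < len(parts) - 1 and parts[i] == "uploads": i += 1; then parts[i:]
def pvSkipB : List (List Char) → List (List Char)
  | [] => []
  | [p] => [p]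
  | p :: q :: rest => if p = "uploads".toList then pvSkipB (q :: rest) else p :: q :: rest

def blob_path_under_uploads_container_py_alt (blob_name : String) : String × String :=
  -- parts = (blob_name or "").strip("/").split("/")
  let raw := PySem.Chars.stripChars
      (if blob_name.toList.isEmpty then "".toList else blob_name.toList) "/".toList
  let parts := PySem.Chars.splitOn raw "/".toList
  -- rel = "/".join(parts[i:])
  let rel := PySem.Chars.join "/".toList (pvSkipB parts)
  let full := if rel.isEmpty then "uploads".toList else "uploads/".toList ++ rel
  (String.ofList rel, String.ofList full)

-- ===== PRECONDITION & SPEC =====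
def Spec_blob_path_under_uploads_container_py (blob_name : String) (out : String × String) : Prop := out = blob_path_under_uploads_container_py_alt blob_name
instance (blob_name : String) (out : String × String) : Decidable (Spec_blob_path_under_uploads_container_py blob_name out) := by unfold Spec_blob_path_under_uploads_container_py; infer_instance

-- ===== CLAIM (what is proved, stated in full; the proofs are below) =====
def Claim_equal_blob_path_under_uploads_container_py : Prop := ∀ (blob_name : String), Dom_blob_path_under_uploads_container_py blob_name → Spec_blob_path_under_uploads_container_py blob_name (blob_path_under_uploads_container_py blob_name)

-- ===== LEMMAS AND PROOFS =====

-- a simple structural split on '/', used only as a proof vehicle for PySem.Chars.splitOn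
def pvSp : List Char → List (List Char)
  | [] => [[]]
  | c :: t => if c = '/' then [] :: pvSp t else (pvSp t).modifyHead (c :: ·)

theorem pvModifyHead_modifyHead {α : Type} (l : List α) (f g : α → α) :
    (l.modifyHead g).modifyHead f = l.modifyHead (fun x => f (g x)) := by
  cases l <;> simp

theorem pvSp_ne_nil (cs : List Char) : pvSp cs ≠ [] := by
  cases cs with
  | nil => simp [pvSp]
  | cons c t =>
    simp only [pvSp]
    split
    · simp
    · cases h : pvSp t with
      | nil => exact absurd h (pvSp_ne_nil t)
      | cons a r => simp

theorem pvSplitOn_go_spec (fuel : Nat) (l cur : List Char) (acc : List (List Char))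
    (hf : l.length ≤ fuel) :
    PySem.Chars.splitOn.go "/".toList fuel l cur acc
      = acc.reverse ++ (pvSp l).modifyHead (cur.reverse ++ ·) := by
  induction fuel generalizing l cur acc with
  | zero =>
    have hl : l = [] := List.length_eq_zero_iff.mp (Nat.le_zero.mp hf)
    subst hl
    rw [PySem.Chars.splitOn.go.eq_def]
    simp [pvSp]
  | succ fuel ih =>
    cases l with
    | nil =>
      rw [PySem.Chars.splitOn.go.eq_def]
      simp [pvSp]
    | cons c rest =>
      rw [PySem.Chars.splitOn.go.eq_def]
      by_cases hc : c = '/'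
      · subst hc
        have hpre : ("/".toList).isPrefixOf ('/' :: rest) = true := by
          rw [List.isPrefixOf_iff_prefix]
          exact ⟨rest, rfl⟩
        have hdrop1 : List.drop "/".toList.length ('/' :: rest) = rest := rfl
        simp only [hpre, if_true, hdrop1]
        rw [ih rest [] (cur.reverse :: acc) (by simpa using Nat.le_of_succ_le_succ hf)]
        have hid : (pvSp rest).modifyHead (fun x => List.reverse ([] : List Char) ++ x)
            = pvSp rest := by
          cases pvSp rest <;> simp
        rw [hid]
        simp only [pvSp]
        simp
      · have hpre : ("/".toList).isPrefixOf (c :: rest) = false := by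
          rw [Bool.eq_false_iff]
          intro hp
          have h1 := (List.cons_prefix_cons.mp (List.isPrefixOf_iff_prefix.mp hp)).1
          exact hc h1.symm
        simp only [hpre, Bool.false_eq_true, if_false]
        rw [ih rest (c :: cur) acc (by simpa using Nat.le_of_succ_le_succ hf)]
        simp only [pvSp, if_neg hc, pvModifyHead_modifyHead]
        congr 2
        funext x
        simp

theorem pvSplitOn_eq_pvSp (s : List Char) :
    PySem.Chars.splitOn s "/".toList = pvSp s := by
  show PySem.Chars.splitOn.go "/".toList (s.length + 1) s [] [] = pvSp s
  rw [pvSplitOn_go_spec (s.length + 1) s [] [] (by omega)]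
  cases pvSp s <;> simp

theorem pvJoin_singleton (a : List Char) :
    PySem.Chars.join "/".toList [a] = a := by
  simp [PySem.Chars.join, List.intercalate]

theorem pvJoin_cons_cons (a b : List Char) (r : List (List Char)) :
    PySem.Chars.join "/".toList (a :: b :: r)
      = a ++ '/' :: PySem.Chars.join "/".toList (b :: r) := by
  simp [PySem.Chars.join, List.intercalate, List.intersperse]

theorem pvJoin_pvSp (cs : List Char) :
    PySem.Chars.join "/".toList (pvSp cs) = cs := by
  induction cs with
  | nil => simp [pvSp, PySem.Chars.join, List.intercalate]
  | cons c t ih =>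
    simp only [pvSp]
    cases h : pvSp t with
    | nil => exact absurd h (pvSp_ne_nil t)
    | cons a r =>
      rw [h] at ih
      by_cases hc : c = '/'
      · subst hc
        rw [if_pos rfl, pvJoin_cons_cons, ih]
        rfl
      · rw [if_neg hc, List.modifyHead_cons]
        cases r with
        | nil =>
          rw [pvJoin_singleton]
          rw [pvJoin_singleton] at ih
          rw [ih]
        | cons b r' =>
          rw [pvJoin_cons_cons] at ih ⊢
          rw [List.cons_append, ih]

theorem pvSp_append (pre t : List Char) (h : '/' ∉ pre) :
    pvSp (pre ++ '/' :: t) = pre :: pvSp t := by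
  induction pre with
  | nil => simp [pvSp]
  | cons c p ih =>
    have hc : c ≠ '/' := fun hh => h (hh ▸ List.mem_cons_self)
    have hp : '/' ∉ p := fun hh => h (List.mem_cons_of_mem _ hh)
    simp only [List.cons_append, pvSp, if_neg hc, ih hp, List.modifyHead_cons]

theorem pvMain (cs : List Char) :
    PySem.Chars.join "/".toList (pvSkipB (pvSp cs)) = pvStripLoopA cs := by
  rw [pvStripLoopA.eq_def]
  by_cases hs : PySem.Chars.startswith cs "uploads/".toList = true
  · -- cs = "uploads" ++ '/' :: t ; A strips the prefix, B skips the first segment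
    have hp : "uploads/".toList <+: cs := by
      simpa [PySem.Chars.startswith, List.isPrefixOf_iff_prefix] using hs
    obtain ⟨t, ht⟩ := hp
    have hcs : cs = "uploads".toList ++ '/' :: t := by rw [← ht]; rfl
    have hdrop : PySem.Chars.slice cs (some 8) none = t := by
      rw [pvSlice8, hcs]
      rfl
    have hsp : pvSp cs = "uploads".toList :: pvSp t := by
      rw [hcs]; exact pvSp_append _ _ (by decide)
    have hlt : t.length < cs.length := by
      rw [hcs]; simp; omega
    rw [hs, if_pos rfl, hdrop, hsp]
    have hrec := pvMain t
    cases h2 : pvSp t with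
    | nil => exact absurd h2 (pvSp_ne_nil t)
    | cons a r =>
      rw [h2] at hrec
      have hsk : pvSkipB ("uploads".toList :: a :: r) = pvSkipB (a :: r) := by
        show (if "uploads".toList = "uploads".toList then pvSkipB (a :: r)
          else "uploads".toList :: a :: r) = pvSkipB (a :: r)
        exact if_pos rfl
      rw [hsk]
      exact hrec
  · rw [if_neg hs]
    have hj := pvJoin_pvSp cs
    cases h : pvSp cs with
    | nil => exact absurd h (pvSp_ne_nil cs)
    | cons a r =>
      rw [h] at hj
      cases r with
      | nil =>
        have hsk : pvSkipB [a] = [a] := rfl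
        rw [hsk]
        exact hj
      | cons b r' =>
        have ha : a ≠ "uploads".toList := by
          intro hh
          apply hs
          have hx : cs = "uploads".toList ++ '/' :: PySem.Chars.join "/".toList (b :: r') := by
            rw [← hj, hh, pvJoin_cons_cons]
          rw [hx]
          simp only [PySem.Chars.startswith]
          rw [List.isPrefixOf_iff_prefix]
          exact ⟨PySem.Chars.join "/".toList (b :: r'), rfl⟩
        have hsk : pvSkipB (a :: b :: r') = a :: b :: r' := by
          show (if a = "uploads".toList then pvSkipB (b :: r') else a :: b :: r') = a :: b :: r'
          exact if_neg ha
        rw [hsk]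
        exact hj
termination_by cs.length
decreasing_by exact hlt

-- ===== VERDICT (by name: the statement is the Claim_ definition above) =====
theorem blob_path_under_uploads_container_py_spec : Claim_equal_blob_path_under_uploads_container_py := by
  intro blob_name _
  unfold Spec_blob_path_under_uploads_container_py
  simp only [blob_path_under_uploads_container_py, blob_path_under_uploads_container_py_alt,
    pvSplitOn_eq_pvSp, pvMain]
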